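-- pv_equiv track=rewrite | github.com/alancast/LeetCodeProblems | python/hard/440_kth_smallest_lexicographical.py | findKthNumber_k_time
-- ===== SOURCE A (Python) =====
-- def findKthNumber_k_time(n: int, k: int) -> int:
--     current_num = 1
--     for _ in range(k-1):
--         # if times 10 is still smaller then multiply by 10
--         if current_num * 10 <= n:
--             current_num *= 10
--         # Otherwise increment digit by 1
--         else:
--             while current_num % 10 == 9 or current_num >= n:
--                 current_num //= 10
--             current_num += 1
--
--     return current_num
-- ===== SOURCE B (Python) =====
-- def findKthNumber_k_time(n: int, k: int) -> int:
--     # Prefix-count trie descent: count the numbers in [1,n] under each prefix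
--     # and skip whole subtrees, instead of stepping one number at a time.
--     def count(prefix):
--         total = 0
--         lo, hi = prefix, prefix + 1
--         while lo <= n:
--             total += min(n + 1, hi) - lo
--             lo *= 10
--             hi *= 10
--         return total
--
--     cur = 1
--     k -= 1
--     while k > 0:
--         c = count(cur)
--         if c <= k:
--             k -= c
--             cur += 1
--         else:
--             cur *= 10
--             k -= 1
--     return cur
-- ===== Notes on version B (the rewrite author's own statement) =====
-- stated objective: alternative
-- what changed: A steps through the lexicographic order one number at a time (k-1 successor steps); B descends the decimal-prefix trie, counting how many numbers in [1,n] lie under each prefix and skipping whole subtrees (it trades the per-step successor walk for O(log^2 n) prefix counting).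
-- outside the precondition, e.g. on findKthNumber_k_time(3, 5): A returns 2, B does not finish within the time limit
import Mathlib
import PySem

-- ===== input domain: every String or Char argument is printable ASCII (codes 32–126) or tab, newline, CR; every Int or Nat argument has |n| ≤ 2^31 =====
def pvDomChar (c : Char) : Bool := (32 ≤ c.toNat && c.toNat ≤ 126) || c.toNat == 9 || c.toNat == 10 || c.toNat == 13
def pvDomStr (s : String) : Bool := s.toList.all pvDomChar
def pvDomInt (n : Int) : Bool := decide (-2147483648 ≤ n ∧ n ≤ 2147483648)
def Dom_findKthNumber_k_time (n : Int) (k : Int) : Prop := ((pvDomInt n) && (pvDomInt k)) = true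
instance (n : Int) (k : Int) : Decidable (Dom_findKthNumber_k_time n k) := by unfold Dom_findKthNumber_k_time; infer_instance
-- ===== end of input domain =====

-- B replaces A's one-number-at-a-time walk (k-1 successor steps) by the prefix-count trie
-- descent: count the numbers in [1,n] under each decimal prefix and skip whole subtrees.

-- ===== PORT A =====
-- A's inner 'while current_num % 10 == 9 or current_num >= n' loop, as fuel recursion
-- (the fuel 100 is never exhausted on inputs admitted by Pre_: the value shrinks by //10 each step)
def pvClimb (n : Int) : Nat → Int → Int
  | 0, x => x
  | f+1, x => if PySem.Int.mod x 10 = 9 ∨ n ≤ x then pvClimb n f (PySem.Int.floordiv x 10) else x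

-- one iteration of the body of A's 'for' loop
def pvStepA (n : Int) (x : Int) : Int :=
  if x * 10 ≤ n then x * 10 else pvClimb n 100 x + 1

def findKthNumber_k_time (n : Int) (k : Int) : Int :=
  (List.range (k - 1).toNat).foldl (fun cur _ => pvStepA n cur) 1

-- ===== PORT B =====
-- B's count(prefix): 'while lo <= n' as fuel recursion (lo is multiplied by 10 each step, so
-- fuel 100 is never exhausted for the prefixes ≥ 1 that B uses on inputs admitted by Pre_)
def pvCount (n : Int) : Nat → Int → Int → Int
  | 0, _, _ => 0
  | f+1, lo, hi => if lo ≤ n then (min (n+1) hi - lo) + pvCount n f (lo*10) (hi*10) else 0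

-- B's main 'while k > 0' loop; on admitted inputs every iteration decreases k by at least 1,
-- so fuel (k-1).toNat is never exhausted
def pvDescend (n : Int) : Nat → Int → Int → Int
  | 0, _, cur => cur
  | f+1, k, cur =>
    if 0 < k then
      if pvCount n 100 cur (cur+1) ≤ k then pvDescend n f (k - pvCount n 100 cur (cur+1)) (cur + 1)
      else pvDescend n f (k - 1) (cur * 10)
    else cur

def findKthNumber_k_time_alt (n : Int) (k : Int) : Int :=
  pvDescend n (k - 1).toNat (k - 1) 1

-- ===== PRECONDITION & SPEC =====
-- Pre_ excludes (a) n ≤ 0 with k ≥ 2, where A's inner while loop never terminates, and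
-- (b) k > n ≥ 1, where there is no k-th number of [1,n] at all: A silently wraps around past n
-- and returns an element of a second traversal cycle (an artefact of its climb loop), while
-- B's descent does not terminate there.
def Pre_findKthNumber_k_time (n : Int) (k : Int) : Prop := k ≤ 1 ∨ (1 ≤ k ∧ k ≤ n)
instance (n : Int) (k : Int) : Decidable (Pre_findKthNumber_k_time n k) := by unfold Pre_findKthNumber_k_time; infer_instance
def pvWitness_findKthNumber_k_time : Int × Int := (10, 3)
def Spec_findKthNumber_k_time (n : Int) (k : Int) (out : Int) : Prop := out = findKthNumber_k_time_alt n k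
instance (n : Int) (k : Int) (out : Int) : Decidable (Spec_findKthNumber_k_time n k out) := by unfold Spec_findKthNumber_k_time; infer_instance

-- ===== CLAIM (what is proved, stated in full; the proofs are below) =====
def Claim_equal_findKthNumber_k_time : Prop := ∀ (n : Int) (k : Int), Dom_findKthNumber_k_time n k → Pre_findKthNumber_k_time n k → Spec_findKthNumber_k_time n k (findKthNumber_k_time n k)

-- ===== LEMMAS AND PROOFS =====

-- Cnt n p = number of integers in [1,n] whose decimal representation has p's as a prefix;
-- Sib n p = the same summed over p and its right siblings p+1, …, up to the next multiple of 10.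
def Cnt (n p : Int) : Int := pvCount n 100 p (p+1)
def Sib (n p : Int) : Int := pvCount n 100 p (10 * (p / 10) + 10)

theorem pvCount_succ (n : Int) (f : Nat) (lo hi : Int) :
    pvCount n (f+1) lo hi = if lo ≤ n then (min (n+1) hi - lo) + pvCount n f (lo*10) (hi*10) else 0 := rfl

theorem count_zero (n : Int) : ∀ (f : Nat) (lo hi : Int), n < lo → pvCount n f lo hi = 0 := by
  intro f lo hi h
  cases f with
  | zero => rfl
  | succ f => rw [pvCount_succ, if_neg (by omega)]

theorem count_self (n : Int) : ∀ (f : Nat) (a : Int), pvCount n f a a = 0 := by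
  intro f
  induction f with
  | zero => intro a; rfl
  | succ f ih =>
    intro a
    rw [pvCount_succ]
    split
    · rw [min_eq_right (by omega), ih]; ring
    · rfl

theorem count_nonneg (n : Int) : ∀ (f : Nat) (lo hi : Int), 0 ≤ lo → lo ≤ hi → 0 ≤ pvCount n f lo hi := by
  intro f
  induction f with
  | zero => intro lo hi _ _; exact le_refl 0
  | succ f ih =>
    intro lo hi h0 hlh
    rw [pvCount_succ]
    split
    · have h1 := ih (lo*10) (hi*10) (by omega) (by omega)
      have h2 : lo ≤ min (n+1) hi := le_min (by omega) hlh
      omega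
    · exact le_refl 0

theorem count_hi_sat (n : Int) : ∀ (f : Nat) (lo hi hi' : Int), 0 ≤ hi → 0 ≤ hi' → n < hi → n < hi' →
    pvCount n f lo hi = pvCount n f lo hi' := by
  intro f
  induction f with
  | zero => intro _ _ _ _ _ _ _; rfl
  | succ f ih =>
    intro lo hi hi' h0 h0' h1 h1'
    rw [pvCount_succ n f lo hi, pvCount_succ n f lo hi']
    split
    · rw [min_eq_left (by omega), min_eq_left (by omega),
        ih (lo*10) (hi*10) (hi'*10) (by omega) (by omega) (by omega) (by omega)]
    · rfl

theorem count_add (n : Int) : ∀ (f : Nat) (a b c : Int), 0 ≤ a → a ≤ b → b ≤ c →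
    pvCount n f a b + pvCount n f b c = pvCount n f a c := by
  intro f
  induction f with
  | zero => intro _ _ _ _ _ _; rfl
  | succ f ih =>
    intro a b c h0 hab hbc
    by_cases han : a ≤ n
    · by_cases hbn : b ≤ n
      · rw [pvCount_succ n f a b, pvCount_succ n f b c, pvCount_succ n f a c, if_pos han, if_pos hbn, if_pos han]
        have h1 := ih (a*10) (b*10) (c*10) (by omega) (by omega) (by omega)
        rw [min_eq_right (by omega)]
        have h2 : min (n+1) c = min (n+1) c := rfl
        linarith [h1]
      · have hnb : n < b := by omega
        rw [pvCount_succ n f a b, pvCount_succ n f b c, pvCount_succ n f a c, if_pos han, if_neg (by omega : ¬ b ≤ n), if_pos han]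
        rw [min_eq_left (by omega), min_eq_left (by omega),
          count_hi_sat n f (a*10) (b*10) (c*10) (by omega) (by omega) (by omega) (by omega)]
        ring
    · have hna : n < a := by omega
      rw [count_zero n _ _ _ hna, count_zero n _ _ _ (by omega : n < b), count_zero n _ _ _ hna]
      ring

theorem count_fuel_succ (n : Int) : ∀ (f : Nat) (lo hi : Int), 0 ≤ lo → n < lo * 10^f →
    pvCount n (f+1) lo hi = pvCount n f lo hi := by
  intro f
  induction f with
  | zero =>
    intro lo hi h0 h
    simp only [pow_zero, mul_one] at h
    rw [count_zero n _ _ _ h, count_zero n _ _ _ h]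
  | succ f ih =>
    intro lo hi h0 h
    have h' : n < (lo*10) * 10^f := by
      have e : (lo*10) * 10^f = lo * 10^(f+1) := by ring
      rw [e]; exact h
    rw [pvCount_succ n (f+1) lo hi, pvCount_succ n f lo hi]
    split
    · rw [ih (lo*10) (hi*10) (by omega) h']
    · rfl

theorem count_100_99 (n lo hi : Int) (h1 : 1 ≤ lo) (hn : n ≤ 2^31) :
    pvCount n 100 lo hi = pvCount n 99 lo hi := by
  refine count_fuel_succ n 99 lo hi (by omega) ?_
  have h10 : (2:Int)^31 < 10^99 := by norm_num
  have h2 : (10:Int)^99 ≤ lo * 10^99 := le_mul_of_one_le_left (by positivity) h1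
  omega

theorem cnt_expand (n p : Int) (h1 : 1 ≤ p) (h2 : p ≤ n) (hn : n ≤ 2^31) :
    Cnt n p = 1 + pvCount n 100 (p*10) (p*10+10) := by
  show pvCount n (99+1) p (p+1) = _
  rw [pvCount_succ, if_pos h2]
  rw [min_eq_right (by omega)]
  rw [show (p+1)*10 = p*10+10 by ring]
  rw [← count_100_99 n (p*10) (p*10+10) (by omega) hn]
  ring

theorem cnt_pos (n p : Int) (h1 : 1 ≤ p) (h2 : p ≤ n) : 1 ≤ Cnt n p := by
  show 1 ≤ pvCount n (99+1) p (p+1)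
  rw [pvCount_succ, if_pos h2]
  have h3 := count_nonneg n 99 (p*10) ((p+1)*10) (by omega) (by omega)
  rw [min_eq_right (by omega)]
  omega

theorem cnt_leaf (n p : Int) (h1 : 1 ≤ p) (h2 : p ≤ n) (h3 : n < p*10) : Cnt n p = 1 := by
  show pvCount n (99+1) p (p+1) = 1
  rw [pvCount_succ, if_pos h2]
  rw [min_eq_right (by omega), count_zero n 99 _ _ (by omega)]
  ring

theorem sib_last (n p : Int) (h0 : 0 ≤ p) (h9 : p % 10 = 9) : Sib n p = Cnt n p := by
  unfold Sib Cnt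
  congr 1
  omega

theorem sib_split (n p : Int) (h0 : 0 ≤ p) (h9 : p % 10 ≠ 9) : Sib n p = Cnt n p + Sib n (p+1) := by
  unfold Sib Cnt
  rw [show (p+1)/10 = p/10 by omega]
  exact (count_add n 100 p (p+1) (10*(p/10)+10) h0 (by omega) (by omega)).symm

theorem sib_zero (n p : Int) (h : n < p) : Sib n p = 0 := count_zero n 100 _ _ h

theorem sib_pos_le (n p : Int) (h : 1 ≤ Sib n p) : p ≤ n := by
  by_contra hc
  rw [sib_zero n p (by omega)] at h
  omega

theorem sib_of_desc (n p : Int) : Sib n (p*10) = pvCount n 100 (p*10) (p*10+10) := by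
  unfold Sib
  congr 1
  omega

theorem total_count (n : Int) : ∀ (f : Nat) (lo : Int), 1 ≤ lo → lo ≤ n → n < lo * 10^f →
    pvCount n f lo (lo*10) = n + 1 - lo := by
  intro f
  induction f with
  | zero => intro lo h1 h2 h3; simp only [pow_zero, mul_one] at h3; omega
  | succ f ih =>
    intro lo h1 h2 h3
    rw [pvCount_succ, if_pos h2]
    by_cases hd : lo*10 ≤ n
    · rw [min_eq_right (by omega)]
      have h3' : n < (lo*10) * 10^f := by
        have e : (lo*10) * 10^f = lo * 10^(f+1) := by ring
        rw [e]; exact h3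
      rw [show lo*10*10 = (lo*10)*10 by ring, ih (lo*10) (by omega) hd h3']
      ring
    · rw [min_eq_left (by omega), count_zero n f _ _ (by omega)]
      ring

theorem sib_one (n : Int) (h1 : 1 ≤ n) (h2 : n ≤ 2^31) : Sib n 1 = n := by
  unfold Sib
  rw [show 10*((1:Int)/10)+10 = 1*10 by decide]
  rw [total_count n 100 1 (le_refl 1) h1
    (by linarith [(by norm_num : (2:Int)^31 < 1 * 10^100)])]
  ring

-- exiting a subtree: one application of A's step at the lexicographically last element lp of
-- the subtree rooted at p climbs back up and yields p+1 (p not a last sibling, p < n)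
theorem exit_step (n p lp : Int) (d : Nat) (h1 : 1 ≤ p) (hp9 : p % 10 ≠ 9) (hpn : p + 1 ≤ n)
    (hn2 : n ≤ 2^31) (hgt : n < 10*lp) (hle : lp ≤ n) (hpow : p * 10^d ≤ lp)
    (hchain : ∀ f : Nat, pvClimb n (f + d) lp = pvClimb n f p) :
    pvStepA n lp = p + 1 := by
  have hd : d ≤ 9 := by
    by_contra h
    push_neg at h
    have h10 : (10:Int)^10 ≤ 10^d := pow_le_pow_right₀ (by norm_num) (by omega)
    have h2 : (10:Int)^d ≤ p * 10^d := le_mul_of_one_le_left (by positivity) h1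
    have h3 : (2:Int)^31 < 10^10 := by norm_num
    omega
  unfold pvStepA
  rw [if_neg (by omega)]
  rw [show 100 = (100 - d) + d from by omega, hchain (100 - d)]
  rw [show 100 - d = (99 - d) + 1 from by omega]
  simp only [pvClimb]
  rw [if_neg]
  rw [PySem.Int.mod_eq_emod_of_pos (by norm_num)]
  simp only [not_or]
  exact ⟨hp9, by omega⟩

-- the heart of the proof: iterating A's step (subtree size − 1) times from a prefix p walks
-- to the lexicographically last element lp of p's subtree, and climbing from lp passes through p
theorem traverse (n : Int) (hn2 : n ≤ 2^31) :
    ∀ (m : Nat) (p : Int), 1 ≤ p → p ≤ n → (n - p).toNat ≤ m →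
    ∃ (lp : Int) (d : Nat),
      (pvStepA n)^[(Cnt n p).toNat - 1] p = lp ∧ n < 10*lp ∧ lp ≤ n ∧ p * 10^d ≤ lp ∧
      (∀ f : Nat, pvClimb n (f + d) lp = pvClimb n f p) := by
  intro m
  induction m with
  | zero =>
    intro p h1 h2 hm
    have hpn : p = n := by omega
    refine ⟨p, 0, ?_, by omega, h2, by simp, fun f => by simp⟩
    rw [cnt_leaf n p h1 h2 (by omega)]
    simp
  | succ m ih =>
    intro p h1 h2 hm
    by_cases hleaf : n < p*10
    · refine ⟨p, 0, ?_, by omega, h2, by simp, fun f => by simp⟩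
      rw [cnt_leaf n p h1 h2 hleaf]
      simp
    · push_neg at hleaf
      have hLa : min (p*10+9) n ≤ p*10+9 := min_le_left _ _
      have hLb : min (p*10+9) n ≤ n := min_le_right _ _
      have hLc : p*10 ≤ min (p*10+9) n := le_min (by omega) hleaf
      set L := min (p*10+9) n with hLdef
      have hL9 : L % 10 = 9 ∨ L = n := by
        rcases le_or_gt (p*10+9) n with h | h
        · left; rw [hLdef, min_eq_left h]; omega
        · right; rw [hLdef, min_eq_right (by omega)]
      obtain ⟨lL, dL, hiter, hgt, hle, hpow, hchain⟩ := ih L (by omega) hLb (by omega)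
      have child_exit : ∀ (a : Int), p*10 ≤ a → a + 1 ≤ L →
          (pvStepA n)^[(Cnt n a).toNat] a = a + 1 := by
        intro a ha1 ha2
        obtain ⟨la, da, hi', hg', hl', hp', hc'⟩ := ih a (by omega) (by omega) (by omega)
        have hstep := exit_step n a la da (by omega) (by omega) (by omega) hn2 hg' hl' hp' hc'
        have hc1 : 1 ≤ Cnt n a := cnt_pos n a (by omega) (by omega)
        rw [show (Cnt n a).toNat = ((Cnt n a).toNat - 1) + 1 from by omega,
          Function.iterate_succ_apply', hi', hstep]
      have chain : ∀ (j : Nat) (a : Int), p*10 ≤ a → a ≤ L → (L - a).toNat = j →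
          (pvStepA n)^[(pvCount n 100 a L).toNat] a = L := by
        intro j
        induction j with
        | zero =>
          intro a ha1 ha2 hj
          have ha : a = L := by omega
          rw [ha, count_self n 100 L]
          simp
        | succ j ihj =>
          intro a ha1 ha2 hj
          have haL : a < L := by omega
          have hsplit : pvCount n 100 a L = Cnt n a + pvCount n 100 (a+1) L :=
            (count_add n 100 a (a+1) L (by omega) (by omega) (by omega)).symm
          have h1a : 1 ≤ Cnt n a := cnt_pos n a (by omega) (by omega)
          have h2a : 0 ≤ pvCount n 100 (a+1) L := count_nonneg n 100 (a+1) L (by omega) (by omega)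
          rw [show (pvCount n 100 a L).toNat = (pvCount n 100 (a+1) L).toNat + (Cnt n a).toNat from by omega,
            Function.iterate_add_apply, child_exit a ha1 (by omega)]
          exact ihj (a+1) (by omega) (by omega) (by omega)
      have hs1 : 0 ≤ pvCount n 100 (p*10) L := count_nonneg n 100 (p*10) L (by omega) hLc
      have hs2 : 1 ≤ Cnt n L := cnt_pos n L (by omega) hLb
      have hsplit : Cnt n p = 1 + (pvCount n 100 (p*10) L + Cnt n L) := by
        rw [cnt_expand n p h1 h2 hn2]
        have e1 : pvCount n 100 (p*10) (p*10+10) = pvCount n 100 (p*10) L + pvCount n 100 L (p*10+10) :=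
          (count_add n 100 (p*10) L (p*10+10) (by omega) hLc (by omega)).symm
        have e2 : pvCount n 100 L (p*10+10) = Cnt n L + pvCount n 100 (L+1) (p*10+10) :=
          (count_add n 100 L (L+1) (p*10+10) (by omega) (by omega) (by omega)).symm
        have e3 : pvCount n 100 (L+1) (p*10+10) = 0 := by
          rcases hL9 with h9 | hn'
          · rw [show L + 1 = p*10+10 from by omega]
            exact count_self n 100 _
          · exact count_zero n 100 _ _ (by omega)
        rw [e1, e2, e3]
        ring
      refine ⟨lL, dL + 1, ?_, hgt, hle, ?_, ?_⟩
      · rw [show (Cnt n p).toNat - 1 = ((Cnt n L).toNat - 1) + ((pvCount n 100 (p*10) L).toNat + 1) from by omega,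
          Function.iterate_add_apply, Function.iterate_succ_apply]
        have hfirst : pvStepA n p = p*10 := by
          unfold pvStepA
          rw [if_pos (by omega)]
        rw [hfirst, chain (L - p*10).toNat (p*10) (le_refl _) hLc rfl, hiter]
      · have e : p * 10^(dL+1) = (p*10) * 10^dL := by ring
        rw [e]
        calc (p*10) * 10^dL ≤ L * 10^dL := mul_le_mul_of_nonneg_right hLc (by positivity)
          _ ≤ lL := hpow
      · intro f
        rw [show f + (dL + 1) = (f + 1) + dL from by omega, hchain (f+1)]
        simp only [pvClimb]
        rw [if_pos, PySem.Int.floordiv_eq_ediv_of_pos (by norm_num),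
          show L / 10 = p from by omega]
        rw [PySem.Int.mod_eq_emod_of_pos (by norm_num)]
        rcases hL9 with h9 | hn'
        · exact Or.inl h9
        · exact Or.inr (by omega)

-- iterating A's step exactly (subtree size) times from prefix p lands on p+1
theorem subtree_exit (n p : Int) (hn2 : n ≤ 2^31) (h1 : 1 ≤ p) (hp9 : p % 10 ≠ 9)
    (hpn : p + 1 ≤ n) : (pvStepA n)^[(Cnt n p).toNat] p = p + 1 := by
  obtain ⟨lp, d, hiter, hgt, hle, hpow, hchain⟩ :=
    traverse n hn2 (n - p).toNat p h1 (by omega) (le_refl _)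
  have hstep := exit_step n p lp d h1 hp9 hpn hn2 hgt hle hpow hchain
  have hc := cnt_pos n p h1 (by omega)
  rw [show (Cnt n p).toNat = ((Cnt n p).toNat - 1) + 1 from by omega,
    Function.iterate_succ_apply', hiter, hstep]

-- B's descent computes the same value as iterating A's step
theorem descend_eq (n : Int) (hn1 : 1 ≤ n) (hn2 : n ≤ 2^31) :
    ∀ (f : Nat) (j cur : Int), 1 ≤ cur → cur ≤ n → 0 ≤ j → j ≤ (f : Int) → j < Sib n cur →
    pvDescend n f j cur = (pvStepA n)^[j.toNat] cur := by
  intro f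
  induction f with
  | zero =>
    intro j cur _ _ h0 hf _
    have hj : j = 0 := by omega
    subst hj
    rfl
  | succ f ih =>
    intro j cur hc1 hc2 h0 hf hsib
    by_cases hj : 0 < j
    · simp only [pvDescend, if_pos hj]
      have hcnt : pvCount n 100 cur (cur+1) = Cnt n cur := rfl
      have hcp : 1 ≤ Cnt n cur := cnt_pos n cur hc1 hc2
      by_cases hcj : pvCount n 100 cur (cur+1) ≤ j
      · rw [if_pos hcj, hcnt]
        rw [hcnt] at hcj
        have h9 : cur % 10 ≠ 9 := by
          intro h9
          rw [sib_last n cur (by omega) h9] at hsib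
          omega
        have hsplit := sib_split n cur (by omega) h9
        have hnext : j - Cnt n cur < Sib n (cur+1) := by omega
        have hc1n : cur + 1 ≤ n := sib_pos_le n (cur+1) (by omega)
        have hexit := subtree_exit n cur hn2 hc1 h9 hc1n
        calc pvDescend n f (j - Cnt n cur) (cur + 1)
            = (pvStepA n)^[(j - Cnt n cur).toNat] (cur+1) :=
              ih (j - Cnt n cur) (cur+1) (by omega) hc1n (by omega) (by omega) hnext
          _ = (pvStepA n)^[(j - Cnt n cur).toNat] ((pvStepA n)^[(Cnt n cur).toNat] cur) := by
              rw [hexit]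
          _ = (pvStepA n)^[(j - Cnt n cur).toNat + (Cnt n cur).toNat] cur :=
              (Function.iterate_add_apply _ _ _ _).symm
          _ = (pvStepA n)^[j.toNat] cur := by congr 1; omega
      · rw [if_neg hcj]
        rw [hcnt] at hcj
        push_neg at hcj
        have hc2' : 2 ≤ Cnt n cur := by omega
        have hdesc : cur * 10 ≤ n := by
          by_contra h
          push_neg at h
          rw [cnt_leaf n cur hc1 hc2 (by omega)] at hc2'
          omega
        have hsd : Sib n (cur*10) = pvCount n 100 (cur*10) (cur*10+10) := sib_of_desc n cur
        have hexp := cnt_expand n cur hc1 hc2 hn2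
        have hstep : pvStepA n cur = cur * 10 := by
          unfold pvStepA
          rw [if_pos hdesc]
        calc pvDescend n f (j - 1) (cur * 10)
            = (pvStepA n)^[(j-1).toNat] (cur*10) :=
              ih (j-1) (cur*10) (by omega) (by omega) (by omega) (by omega) (by rw [hsd]; omega)
          _ = (pvStepA n)^[(j-1).toNat] (pvStepA n cur) := by rw [hstep]
          _ = (pvStepA n)^[(j-1).toNat + 1] cur := (Function.iterate_succ_apply _ _ _).symm
          _ = (pvStepA n)^[j.toNat] cur := by congr 1; omega
    · have hj0 : j = 0 := by omega
      subst hj0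
      simp [pvDescend]

-- A's 'for _ in range(m)' is iteration of its body
theorem foldl_range_eq_iterate (g : Int → Int) (x : Int) :
    ∀ m : Nat, (List.range m).foldl (fun c _ => g c) x = g^[m] x := by
  intro m
  induction m with
  | zero => simp
  | succ m ih =>
    rw [List.range_succ, List.foldl_append, ih]
    simp [Function.iterate_succ_apply']

-- ===== VERDICT (by name: the statement is the Claim_ definition above) =====
theorem findKthNumber_k_time_spec : Claim_equal_findKthNumber_k_time := by
  unfold Claim_equal_findKthNumber_k_time Spec_findKthNumber_k_time
  intro n k hdom hpre
  have hn2 : n ≤ 2^31 := by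
    simp only [Dom_findKthNumber_k_time, pvDomInt, Bool.and_eq_true, decide_eq_true_eq] at hdom
    omega
  unfold findKthNumber_k_time findKthNumber_k_time_alt
  rw [foldl_range_eq_iterate]
  rcases hpre with hk1 | ⟨hk1, hkn⟩
  · rw [show (k-1).toNat = 0 from by omega]
    rfl
  · have hn1 : 1 ≤ n := by omega
    rw [descend_eq n hn1 hn2 ((k-1).toNat) (k-1) 1 (by norm_num) (by omega) (by omega)
      (by omega) (by rw [sib_one n hn1 hn2]; omega)]
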